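-- pv_equiv track=rewrite | github.com/ParsaPNT128/quera-trainings | trainings/QT5.py | message_tracker
-- ===== SOURCE A (Python) =====
-- def message_tracker(k, t):
--     messages = ['Peygir', 'Tannaz']
--     n = 1
--     for i in range(k):
--         if messages[len(messages) - 1] == 'Morshed':
--             if n != t:
--                 messages.append('Tannaz')
--             else:
--                 messages.append('Peygir')
--                 messages.append('Tannaz')
--                 n = 0
--         elif messages[len(messages) - 1] == 'Tannaz':
--             if n != t:
--                 messages.append('Jeddy')
--             else:
--                 messages.append('Peygir')
--                 messages.append('Jeddy')
--                 n = 0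
--         elif messages[len(messages) - 1] == 'Jeddy':
--             if n != t:
--                 messages.append('Morshed')
--             else:
--                 messages.append('Peygir')
--                 messages.append('Morshed')
--                 n = 0
--
--         n += 1
--
--     return messages
-- ===== SOURCE B (Python) =====
-- def message_tracker(k, t):
--     messages = ['Peygir', 'Tannaz']
--     n = 1
--     cycle = ['Jeddy', 'Morshed', 'Tannaz']
--     for i in range(k):
--         if n == t:
--             messages.append('Peygir')
--             n = 0
--         messages.append(cycle[i % 3])
--         n += 1
--     return messages
-- ===== Notes on version B (the rewrite author's own statement) =====
-- stated objective: simpler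
-- what changed: B derives each next message by modular indexing into the fixed 3-cycle ['Jeddy','Morshed','Tannaz'] instead of A's state machine that inspects the last appended list element and branches three ways; the periodic 'Peygir' insertion becomes a single guard before the append.
import Mathlib
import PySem

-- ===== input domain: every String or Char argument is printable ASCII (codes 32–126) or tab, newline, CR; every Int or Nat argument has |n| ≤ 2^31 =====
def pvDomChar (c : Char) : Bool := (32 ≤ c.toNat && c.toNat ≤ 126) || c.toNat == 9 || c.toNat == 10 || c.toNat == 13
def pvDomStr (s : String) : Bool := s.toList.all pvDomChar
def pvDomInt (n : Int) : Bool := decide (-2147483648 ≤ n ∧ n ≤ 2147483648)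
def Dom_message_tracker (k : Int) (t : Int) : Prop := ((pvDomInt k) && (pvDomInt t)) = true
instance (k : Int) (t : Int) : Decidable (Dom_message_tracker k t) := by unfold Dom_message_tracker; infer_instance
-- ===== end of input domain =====

-- B replaces A's last-element state machine by modular indexing into the fixed 3-cycle (simpler; same cost).

-- ===== PORT A =====
-- one loop iteration of A: inspect messages[len(messages)-1], branch, then n += 1
def msgStepA (t : Int) (st : List String × Int) (_i : Int) : List String × Int :=
  let messages := st.1
  let n := st.2
  let last := (PySem.List.pyGet? messages ((messages.length : Int) - 1)).getD ""
  let st' :=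
    if last = "Morshed" then
      if n ≠ t then (messages ++ ["Tannaz"], n)
      else (messages ++ ["Peygir", "Tannaz"], (0 : Int))
    else if last = "Tannaz" then
      if n ≠ t then (messages ++ ["Jeddy"], n)
      else (messages ++ ["Peygir", "Jeddy"], (0 : Int))
    else if last = "Jeddy" then
      if n ≠ t then (messages ++ ["Morshed"], n)
      else (messages ++ ["Peygir", "Morshed"], (0 : Int))
    else (messages, n)
  (st'.1, st'.2 + 1)

def message_tracker (k : Int) (t : Int) : List String :=
  ((PySem.List.pyRange 0 k 1).foldl (msgStepA t) (["Peygir", "Tannaz"], 1)).1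

-- ===== PORT B =====
-- one loop iteration of B: optional 'Peygir' (reset), then cycle[i % 3], then n += 1
def msgStepB (t : Int) (st : List String × Int) (i : Int) : List String × Int :=
  let messages := st.1
  let n := st.2
  let p := if n = t then (messages ++ ["Peygir"], (0 : Int)) else (messages, n)
  let main := (PySem.List.pyGet? ["Jeddy", "Morshed", "Tannaz"] (PySem.Int.mod i 3)).getD ""
  (p.1 ++ [main], p.2 + 1)

def message_tracker_alt (k : Int) (t : Int) : List String :=
  ((PySem.List.pyRange 0 k 1).foldl (msgStepB t) (["Peygir", "Tannaz"], 1)).1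

-- ===== PRECONDITION & SPEC =====
def Spec_message_tracker (k : Int) (t : Int) (out : List String) : Prop := out = message_tracker_alt k t
instance (k : Int) (t : Int) (out : List String) : Decidable (Spec_message_tracker k t out) := by unfold Spec_message_tracker; infer_instance

-- ===== CLAIM (what is proved, stated in full; the proofs are below) =====
def Claim_equal_message_tracker : Prop := ∀ (k : Int) (t : Int), Dom_message_tracker k t → Spec_message_tracker k t (message_tracker k t)

-- ===== LEMMAS AND PROOFS =====

-- the message A's state machine reads as "last" after m iterations (= cycle[(m-1) % 3], with Tannaz at start)
def msgLast (m : Nat) : String :=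
  if m % 3 = 0 then "Tannaz" else if m % 3 = 1 then "Jeddy" else "Morshed"

-- one synchronized step: from a state ending in msgLast m, both steps produce the same
-- explicit successor state, ending in msgLast (m+1)
theorem msg_step_eq (t n : Int) (pre : List String) (m : Nat) :
    msgStepA t (pre ++ [msgLast m], n) ((m : Nat) : Int)
      = ((if n = t then pre ++ [msgLast m] ++ ["Peygir"] else pre ++ [msgLast m]) ++ [msgLast (m + 1)],
         (if n = t then 0 else n) + 1)
    ∧ msgStepB t (pre ++ [msgLast m], n) ((m : Nat) : Int)
      = ((if n = t then pre ++ [msgLast m] ++ ["Peygir"] else pre ++ [msgLast m]) ++ [msgLast (m + 1)],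
         (if n = t then 0 else n) + 1) := by
  have h1 : (m + 1) % 3 = (m % 3 + 1) % 3 := by omega
  have hmod2 : ((m : Nat) : Int) % (3 : Int) = ((m % 3 : Nat) : Int) := by omega
  have h3 := Nat.mod_lt m (show 0 < 3 by omega)
  interval_cases h : m % 3 <;> by_cases hn : n = t <;>
    simp [msgStepA, msgStepB, msgLast, hmod2, h, h1, hn]

theorem msg_invariant (t : Int) (m : Nat) :
    (((List.range m).map (fun j => ((j : Nat) : Int))).foldl (msgStepA t) (["Peygir", "Tannaz"], 1)
      = ((List.range m).map (fun j => ((j : Nat) : Int))).foldl (msgStepB t) (["Peygir", "Tannaz"], 1))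
    ∧ ∃ pre n, ((List.range m).map (fun j => ((j : Nat) : Int))).foldl (msgStepA t) (["Peygir", "Tannaz"], 1)
        = (pre ++ [msgLast m], n) := by
  induction m with
  | zero => exact ⟨rfl, ["Peygir"], 1, rfl⟩
  | succ m ih =>
    obtain ⟨heq, pre, n, hst⟩ := ih
    rw [List.range_succ, List.map_append, List.foldl_append, List.foldl_append, ← heq, hst]
    simp only [List.map_cons, List.map_nil, List.foldl_cons, List.foldl_nil]
    rw [(msg_step_eq t n pre m).1, (msg_step_eq t n pre m).2]
    exact ⟨rfl, _, _, rfl⟩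

-- ===== VERDICT (by name: the statement is the Claim_ definition above) =====
theorem message_tracker_spec : Claim_equal_message_tracker := by
  intro k t _
  show message_tracker k t = message_tracker_alt k t
  unfold message_tracker message_tracker_alt
  rw [PySem.List.pyRange_one]
  simp only [sub_zero, zero_add]
  exact congrArg Prod.fst (msg_invariant t k.toNat).1
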